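-- pv_equiv track=rewrite | github.com/AngelGiI/ComputerScienceUCM | Practicas/Practica2AngelGil.py | jugada_ganadora
-- ===== SOURCE A (Python) =====
-- def desc_bin(n): # funcion auxiliar que devuelve un numero (<32) en base 2
--     l=[]         # como lista (ordenada).
--     if n > 31:
--         raise Exception("No se admiten montones de mas de 31 piezas.")
--     while n > 0:
--         if n % 2 == 0:
--             n = n/2
--             l.insert(0,0)   # Añadimos la nueva cifra al principio de la lista
--         else:               # para que la factorizacion se devuelva ordenada.
--             n = (n - 1)/2
--             l.insert(0,1)
--     while len(l) < 5:
--         l.insert(0,0)       # Añadimos 0's hasta llegar a longitud 5.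
--     return l
--
-- def sumas(mts):
--     suma=[0,0,0,0,0]
--     for i in range(len(mts)):    # Llamamos a 'desc_bin' para cada monton.
--         l = desc_bin(mts[i])     # y vamos calculando la suma acumulada en
--         for j in range(len(l)):  # modulo 2 sin llevadas.
--             suma[j] = (suma[j] + l[j]) % 2
--     return suma
--
-- def jugada_ganadora(mts):
--     i = 0; a = sumas(mts)
--     while a[i] == 0:          # Primero encontramos en que posicion de la suma
--         i = i + 1             # sin llevadas esta el 1 "mas a la izquierda".
--     j = 0; b = mts[j]; c = desc_bin(b)
--     while c[i] == 0 and j < len(mts) - 1:      # Encontramos un monton (el 1º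
--         j = j + 1; b = mts[j]; c = desc_bin(b) # de hecho) que tenga un 1 en
--                                                # dicha posicion.
--     d = 0
--     while i < len(a):                   # Evaluamos desde el primer '1' de la
--         if a[i] == 1:                   # suma en adelante, acumulando en 'd'
--             if c[i] == 1:               # el numero de fichas a sustraer.
--                 d = d + 2 ** (4 - i)
--             else:
--                 d = d - 2 ** (4 - i)
--         i = i + 1
--     return j,b,d
-- ===== SOURCE B (Python) =====
-- def jugada_ganadora(mts):
--     # XOR-sum of the heaps (non-positive heaps contribute 0, as desc_bin gives all zeros)
--     x = 0
--     for m in mts: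
--         if m > 31:
--             raise Exception("No se admiten montones de mas de 31 piezas.")
--         if m > 0:
--             x ^= m
--     # winning heap: first heap whose value drops when XORed with x
--     j, b = next((j, m) for j, m in enumerate(mts) if m > 0 and (m ^ x) < m)
--     return j, b, b - (b ^ x)
-- ===== Notes on version B (the rewrite author's own statement) =====
-- stated objective: simpler
-- what changed: Replaces A's per-bit machinery (5-digit binary lists from desc_bin, digit-wise mod-2 sums, a bit-scan for the leading 1 and a +/-2^(4-i) accumulation loop) with native integer XOR: one pass computes the XOR-sum x, the winning heap is the first m with (m ^ x) < m, and the move is m - (m ^ x).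
import Mathlib
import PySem

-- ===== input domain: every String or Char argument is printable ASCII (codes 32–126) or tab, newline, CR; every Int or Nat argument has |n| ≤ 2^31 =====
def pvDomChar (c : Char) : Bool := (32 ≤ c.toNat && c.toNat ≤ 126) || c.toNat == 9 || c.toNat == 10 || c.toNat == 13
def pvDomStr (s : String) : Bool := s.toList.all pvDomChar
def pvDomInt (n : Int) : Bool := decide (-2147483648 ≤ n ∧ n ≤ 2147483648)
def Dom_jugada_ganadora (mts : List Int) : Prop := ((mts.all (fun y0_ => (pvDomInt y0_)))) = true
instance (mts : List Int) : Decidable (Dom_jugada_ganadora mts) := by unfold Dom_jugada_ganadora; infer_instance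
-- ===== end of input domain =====

-- B replaces A's per-bit list arithmetic (5-bit digit lists, bitwise mod-2 sums, a ±2^(4-i)
-- accumulation loop) by native integer XOR: one XOR pass, then the first heap m with (m^x) < m
-- and the move m - (m^x). Equivalence is for the RETURN value on unbalanced positions (Pre_).

-- ===== PORT A =====
-- while n > 0: halve, prepending the digit.  Python's n/2 and (n-1)/2 are float true divisions
-- but always integer-valued here (n > 0), so Int division is exact.  Fuel-bounded structural
-- recursion (fuel 40 covers every |n| ≤ 2^31; the loop runs at most 31 times).
def descBinLoop : Nat → Int → List Int → List Int
  | 0, _, l => l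
  | f+1, n, l =>
    if n > 0 then
      (if n % 2 = 0 then descBinLoop f (n/2) (0 :: l)
       else descBinLoop f ((n-1)/2) (1 :: l))
    else l

-- while len(l) < 5: l.insert(0,0)
def padLoop : Nat → List Int → List Int
  | 0, l => l
  | f+1, l => if l.length < 5 then padLoop f (0 :: l) else l

-- desc_bin; the 'raise Exception' branch (n > 31) is modelled as junk [] — excluded by Pre_.
def descBin (n : Int) : List Int :=
  if n > 31 then [] else padLoop 5 (descBinLoop 40 n [])

-- sumas: digit-wise (suma[j] + l[j]) % 2 over all heaps
def sumas (mts : List Int) : List Int :=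
  mts.foldl (fun suma m => suma.zipWith (fun s c => (s + c) % 2) (descBin m)) [0,0,0,0,0]

-- while a[i] == 0: i += 1.  a[5] raises IndexError in Python (balanced position) — excluded by
-- Pre_; default 1 just stops the loop there.
def findIdx1 : Nat → List Int → Nat → Nat
  | 0, _, i => i
  | f+1, a, i => if a.getD i 1 = 0 then findIdx1 f a (i+1) else i

-- while c[i] == 0 and j < len(mts)-1: j += 1 (recomputing b, c each turn)
def findHeap : Nat → List Int → Nat → Nat → Nat
  | 0, _, _, j => j
  | f+1, mts, i, j =>
    if (descBin (mts.getD j 0)).getD i 1 = 0 ∧ j < mts.length - 1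
    then findHeap f mts i (j+1) else j

-- while i < len(a): d ± 2**(4-i) on the 1-digits of a
def dLoop : Nat → List Int → List Int → Nat → Int → Int
  | 0, _, _, _, d => d
  | f+1, a, c, i, d =>
    if i < a.length then
      dLoop f a c (i+1) (if a.getD i 0 = 1 then (if c.getD i 0 = 1 then d + 2^(4-i) else d - 2^(4-i)) else d)
    else d

def jugada_ganadora (mts : List Int) : Int × Int × Int :=
  let a := sumas mts
  let i := findIdx1 6 a 0
  let j := findHeap (mts.length + 1) mts i 0
  let b := mts.getD j 0      -- mts[j]; IndexError (empty list) only outside Pre_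
  let c := descBin b
  ((j : Int), b, dLoop 6 a c i 0)

-- ===== PORT B =====
-- Source B's x ^= m (ints, only for m > 0, so values stay in ℕ); Lean's ℤ has no ^^^, so the XOR is
-- taken on .toNat — exact for these non-negative values.  The m > 31 raise is excluded by Pre_.
-- first (j, m) with m > 0 and (m ^ x) < m; none = Source B's StopIteration, excluded by Pre_
def findWinIdx (x : Nat) : List Int → Nat → Option (Nat × Int)
  | [], _ => none
  | m :: rest, j =>
    if 0 < m ∧ ((m.toNat ^^^ x : Nat) : Int) < m then some (j, m)
    else findWinIdx x rest (j+1)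

def jugada_ganadora_alt (mts : List Int) : Int × Int × Int :=
  let x := mts.foldl (fun x m => if 0 < m then x ^^^ m.toNat else x) 0
  match findWinIdx x mts 0 with
  | some (j, b) => ((j : Int), b, b - ((b.toNat ^^^ x : Nat) : Int))
  | none => (0, 0, 0)      -- Source B raises StopIteration here; excluded by Pre_

-- ===== PRECONDITION & SPEC =====
-- A raises Exception on any heap > 31 and IndexError on a balanced position (heap XOR-sum 0,
-- e.g. the empty list); B raises there too (same Exception / StopIteration), so exactly those
-- inputs are excluded.  Non-positive heaps contribute 0 to the XOR-sum, as in both programs.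
def Pre_jugada_ganadora (mts : List Int) : Prop :=
  (∀ m ∈ mts, m ≤ 31) ∧ mts.foldl (fun x m => x ^^^ m.toNat) 0 ≠ 0
instance (mts : List Int) : Decidable (Pre_jugada_ganadora mts) := by
  unfold Pre_jugada_ganadora; infer_instance

def pvWitness_jugada_ganadora : List Int := [1, 2]

def Spec_jugada_ganadora (mts : List Int) (out : Int × Int × Int) : Prop := out = jugada_ganadora_alt mts
instance (mts : List Int) (out : Int × Int × Int) : Decidable (Spec_jugada_ganadora mts out) := by unfold Spec_jugada_ganadora; infer_instance

-- ===== CLAIM (what is proved, stated in full; the proofs are below) =====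
def Claim_equal_jugada_ganadora : Prop := ∀ (mts : List Int), Dom_jugada_ganadora mts → Pre_jugada_ganadora mts → Spec_jugada_ganadora mts (jugada_ganadora mts)

-- ===== LEMMAS AND PROOFS =====

def bI (b : Bool) : Int := if b then 1 else 0

-- the value of desc_bin, as the 5 bits of n (big-endian)
def bits5 (n : Nat) : List Int :=
  [bI (n.testBit 4), bI (n.testBit 3), bI (n.testBit 2), bI (n.testBit 1), bI (n.testBit 0)]

theorem descBinLoop_nonpos (f : Nat) (n : Int) (l : List Int) (h : n ≤ 0) :
    descBinLoop f n l = l := by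
  cases f with
  | zero => rfl
  | succ f => simp [descBinLoop, if_neg (by omega : ¬ n > 0)]

theorem descBin_eq (m : Int) (hm : m ≤ 31) : descBin m = bits5 m.toNat := by
  by_cases h : m ≤ 0
  · have h0 : m.toNat = 0 := by omega
    unfold descBin
    rw [if_neg (by omega : ¬ m > 31), descBinLoop_nonpos _ _ _ h, h0]
    decide
  · have h' : 0 < m := by omega
    interval_cases m <;> decide

theorem bI_mod2 (u v i : Nat) :
    (bI (u.testBit i) + bI (v.testBit i)) % 2 = bI ((u ^^^ v).testBit i) := by
  rw [Nat.testBit_xor]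
  cases hu : u.testBit i <;> cases hv : v.testBit i <;> decide

theorem zip_bits5 (u v : Nat) :
    (bits5 u).zipWith (fun s c => (s + c) % 2) (bits5 v) = bits5 (u ^^^ v) := by
  simp only [bits5, List.zipWith_cons_cons, List.zipWith_nil_left, bI_mod2]

theorem sumas_bits (l : List Int) (acc : Nat) (h31 : ∀ m ∈ l, m ≤ 31) :
    l.foldl (fun suma m => suma.zipWith (fun s c => (s + c) % 2) (descBin m)) (bits5 acc)
      = bits5 (l.foldl (fun x m => x ^^^ m.toNat) acc) := by
  induction l generalizing acc with
  | nil => rfl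
  | cons m rest ih =>
    simp only [List.foldl_cons]
    rw [descBin_eq m (h31 m (by simp)), zip_bits5]
    exact ih (acc ^^^ m.toNat) (fun x hx => h31 x (by simp [hx]))

theorem xor_fold_lt (l : List Int) (acc : Nat) (hacc : acc < 32) (h31 : ∀ m ∈ l, m ≤ 31) :
    l.foldl (fun x m => x ^^^ m.toNat) acc < 32 := by
  induction l generalizing acc with
  | nil => exact hacc
  | cons m rest ih =>
    refine ih (acc ^^^ m.toNat) ?_ (fun x hx => h31 x (by simp [hx]))
    have h1 : m.toNat < 2 ^ 5 := by have := h31 m (by simp); omega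
    exact Nat.xor_lt_two_pow (n := 5) hacc h1

-- B's guarded XOR fold equals the plain clamped fold (toNat of a non-positive int is 0)
theorem xor_fold_guard (l : List Int) (acc : Nat) :
    l.foldl (fun x m => if 0 < m then x ^^^ m.toNat else x) acc
      = l.foldl (fun x m => x ^^^ m.toNat) acc := by
  induction l generalizing acc with
  | nil => rfl
  | cons m rest ih =>
    simp only [List.foldl_cons]
    by_cases h : 0 < m
    · rw [if_pos h]; exact ih _
    · rw [if_neg h, show m.toNat = 0 by omega, Nat.xor_zero]; exact ih _

-- decided facts on the 5-bit world (X = XOR-sum, u = a heap, both < 32)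
theorem dec_pred (X u : Fin 32) (hX : 0 < X.val) :
    (bits5 u.val).getD (findIdx1 6 (bits5 X.val) 0) 1 = 0 ↔
      ¬ (0 < u.val ∧ u.val ^^^ X.val < u.val) := by
  revert X u hX; decide

theorem dec_bit (X u : Fin 32) :
    (bits5 u.val).getD (findIdx1 6 (bits5 X.val) 0) 1 = 0 →
      u.val.testBit (4 - findIdx1 6 (bits5 X.val) 0) = false := by
  revert X u; decide

theorem dec_top (X : Fin 32) (hX : 0 < X.val) :
    X.val.testBit (4 - findIdx1 6 (bits5 X.val) 0) = true := by
  revert X hX; decide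

theorem dec_d (X u : Fin 32) :
    dLoop 6 (bits5 X.val) (bits5 u.val) (findIdx1 6 (bits5 X.val) 0) 0
      = (u.val : Int) - ((u.val ^^^ X.val : Nat) : Int) := by
  revert X u; decide

-- Nat-level restatements of the decided facts (Fin.mk.val reduces definitionally)
theorem dec_pred' (X u : Nat) (hX32 : X < 32) (hu : u < 32) (hX : 0 < X) :
    (bits5 u).getD (findIdx1 6 (bits5 X) 0) 1 = 0 ↔ ¬ (0 < u ∧ u ^^^ X < u) :=
  dec_pred ⟨X, hX32⟩ ⟨u, hu⟩ hX

theorem dec_bit' (X u : Nat) (hX32 : X < 32) (hu : u < 32) :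
    (bits5 u).getD (findIdx1 6 (bits5 X) 0) 1 = 0 →
      u.testBit (4 - findIdx1 6 (bits5 X) 0) = false :=
  dec_bit ⟨X, hX32⟩ ⟨u, hu⟩

theorem dec_top' (X : Nat) (hX32 : X < 32) (hX : 0 < X) :
    X.testBit (4 - findIdx1 6 (bits5 X) 0) = true :=
  dec_top ⟨X, hX32⟩ hX

theorem dec_d' (X u : Nat) (hX32 : X < 32) (hu : u < 32) :
    dLoop 6 (bits5 X) (bits5 u) (findIdx1 6 (bits5 X) 0) 0
      = (u : Int) - ((u ^^^ X : Nat) : Int) :=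
  dec_d ⟨X, hX32⟩ ⟨u, hu⟩

-- bridge between B's Int-side condition and the Nat-side condition of dec_pred
theorem pred_bridge (X : Nat) (m : Int) :
    (0 < m ∧ ((m.toNat ^^^ X : Nat) : Int) < m) ↔ (0 < m.toNat ∧ m.toNat ^^^ X < m.toNat) := by
  generalize m.toNat ^^^ X = k
  omega

theorem fold_testBit (l : List Int) (t : Nat) (acc : Nat)
    (h : ∀ m ∈ l, (m.toNat).testBit t = false) :
    (l.foldl (fun x m => x ^^^ m.toNat) acc).testBit t = acc.testBit t := by
  induction l generalizing acc with
  | nil => rfl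
  | cons m rest ih =>
    simp only [List.foldl_cons]
    rw [ih _ (fun x hx => h x (by simp [hx])), Nat.testBit_xor, h m (by simp), Bool.xor_false]

-- an unbalanced position has a heap B's search accepts
theorem exists_winner (mts : List Int) (h31 : ∀ m ∈ mts, m ≤ 31)
    (hX0 : mts.foldl (fun x m => x ^^^ m.toNat) 0 ≠ 0) :
    ∃ m ∈ mts, 0 < m ∧ ((m.toNat ^^^ (mts.foldl (fun x m => x ^^^ m.toNat) 0) : Nat) : Int) < m := by
  set X := mts.foldl (fun x m => x ^^^ m.toNat) 0 with hXdef
  have hX32 : X < 32 := xor_fold_lt mts 0 (by norm_num) h31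
  by_contra hno
  push Not at hno
  have hbit : ∀ m ∈ mts, (m.toNat).testBit (4 - findIdx1 6 (bits5 X) 0) = false := by
    intro m hm
    have hm31 : m.toNat < 32 := by have := h31 m hm; omega
    apply dec_bit' X m.toNat hX32 hm31
    rw [dec_pred' X m.toNat hX32 hm31 (by omega)]
    intro hc
    rcases hc with ⟨h1, h2⟩
    have := hno m hm (by omega)
    omega
  have := fold_testBit mts (4 - findIdx1 6 (bits5 X) 0) 0 hbit
  rw [← hXdef, dec_top' X hX32 (by omega)] at this
  simp [Nat.zero_testBit] at this

-- A's j-search and B's first-index search find the same heap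
theorem loop_eq (rest : List Int) : ∀ (mts : List Int) (j fuel X : Nat), X < 32 → 0 < X →
    rest = mts.drop j → mts.length - j ≤ fuel → (∀ m ∈ mts, m ≤ 31) →
    (∃ m ∈ rest, 0 < m ∧ ((m.toNat ^^^ X : Nat) : Int) < m) →
    findWinIdx X rest j
      = some (findHeap fuel mts (findIdx1 6 (bits5 X) 0) j,
              mts.getD (findHeap fuel mts (findIdx1 6 (bits5 X) 0) j) 0) := by
  induction rest with
  | nil => intro _ _ _ _ _ _ _ _ _ hex; simp at hex
  | cons m rest' ih =>
    intro mts j fuel X hX32 hXpos hdrop hfuel h31 hex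
    have hj : j < mts.length := by
      by_contra hj
      rw [List.drop_eq_nil_of_le (by omega)] at hdrop
      simp at hdrop
    have hcons : mts.drop j = mts[j] :: mts.drop (j+1) := (List.getElem_cons_drop hj).symm
    rw [hcons] at hdrop
    injection hdrop with hm hrest'
    have hgd : mts.getD j 0 = m := by rw [List.getD_eq_getElem?_getD, List.getElem?_eq_getElem hj, hm]; rfl
    have hmem : m ∈ mts := hm ▸ List.getElem_mem hj
    have hm31 : m ≤ 31 := h31 m hmem
    have hmN : m.toNat < 32 := by omega
    obtain ⟨f, rfl⟩ : ∃ f, fuel = f + 1 := ⟨fuel - 1, by omega⟩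
    have hcond : ((descBin m).getD (findIdx1 6 (bits5 X) 0) 1 = 0)
        ↔ ¬ (0 < m ∧ ((m.toNat ^^^ X : Nat) : Int) < m) := by
      rw [descBin_eq m hm31, pred_bridge]
      exact dec_pred' X m.toNat hX32 hmN hXpos
    by_cases hp : 0 < m ∧ ((m.toNat ^^^ X : Nat) : Int) < m
    · rw [findWinIdx, if_pos hp]
      rw [findHeap, hgd, if_neg (by rw [hcond]; tauto)]
      rw [hgd]
    · rw [findWinIdx, if_neg hp]
      have hex' : ∃ x ∈ rest', 0 < x ∧ ((x.toNat ^^^ X : Nat) : Int) < x := by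
        rcases hex with ⟨x, hx, hxp⟩
        rcases List.mem_cons.mp hx with rfl | hx'
        · exact absurd hxp hp
        · exact ⟨x, hx', hxp⟩
      have hjlt : j < mts.length - 1 := by
        by_contra hge
        have hnil : rest' = [] := by
          rw [hrest']; exact List.drop_eq_nil_of_le (by omega)
        rw [hnil] at hex'
        simp at hex'
      rw [findHeap, hgd, if_pos ⟨hcond.mpr hp, hjlt⟩]
      exact ih mts (j+1) f X hX32 hXpos hrest' (by omega) h31 hex'

-- a successful B-search returns a member heap satisfying its condition
theorem findWinIdx_sound (X : Nat) (l : List Int) : ∀ (j k : Nat) (b : Int),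
    findWinIdx X l j = some (k, b) → b ∈ l ∧ 0 < b ∧ ((b.toNat ^^^ X : Nat) : Int) < b := by
  induction l with
  | nil => intro _ _ _ h; simp [findWinIdx] at h
  | cons m rest ih =>
    intro j k b h
    rw [findWinIdx] at h
    split_ifs at h with hp
    · injection h with h'; injection h' with h1 h2
      exact ⟨by simp [← h2], h2 ▸ hp⟩
    · obtain ⟨hmem, hrest⟩ := ih (j+1) k b h
      exact ⟨by simp [hmem], hrest⟩

-- ===== VERDICT (by name: the statement is the Claim_ definition above) =====
theorem jugada_ganadora_spec : Claim_equal_jugada_ganadora := by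
  intro mts _hdom hpre
  obtain ⟨h31, hX0⟩ := hpre
  unfold Spec_jugada_ganadora jugada_ganadora jugada_ganadora_alt
  set X := mts.foldl (fun x m => x ^^^ m.toNat) 0 with hXdef
  have hX32 : X < 32 := xor_fold_lt mts 0 (by norm_num) h31
  have hsum : sumas mts = bits5 X := by
    unfold sumas
    rw [show ([0,0,0,0,0] : List Int) = bits5 0 from by decide]
    exact sumas_bits mts 0 h31
  have hx : mts.foldl (fun x m => if 0 < m then x ^^^ m.toNat else x) 0 = X :=
    xor_fold_guard mts 0
  have hloop := loop_eq mts mts 0 (mts.length + 1) X hX32 (by omega) rfl (by omega) h31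
      (exists_winner mts h31 hX0)
  simp only [hsum, hx, hloop]
  set jA := findHeap (mts.length + 1) mts (findIdx1 6 (bits5 X) 0) 0 with hjA
  set b := mts.getD jA 0 with hb
  obtain ⟨hmem, hbpos, _⟩ := findWinIdx_sound X mts 0 jA b hloop
  have hb31 : b ≤ 31 := h31 b hmem
  have hbN : b.toNat < 32 := by omega
  rw [descBin_eq b hb31]
  have hd := dec_d' X b.toNat hX32 hbN
  simp only [hd]
  have : ((b.toNat : Nat) : Int) = b := by omega
  rw [this]
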